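-- pv_equiv track=rewrite | github.com/Leewongi0731/DailyCodeTest | [프로그래머스 레벨3] 풍선 터트리기.py | solution
-- ===== SOURCE A (Python) =====
-- def solution(a):
--     minV = min(a)
--     index = a.index( minV )
--     answer = 1 # 더 작은 풍선을 한번도 안터트리면, 최소값이 최종적으로 남음
--
--     # 가장 최소값을 기준으로 왼쪽만 보기 ( 오른쪽의 최소값과의 비교에서 전부 제거 가능 )
--     left = []
--     for i, data in enumerate( a[:index] ):
--         left.append( [data, i] )
--     left = sorted( left )
--
--     leftMinValIndex = index
--     for data, i in left:
--         if i < leftMinValIndex: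
--             # 해당 값보다 작은 값이 왼쪽에 없다.
--             # 여기까지 전체 a list에서 가장 작은 값을 가져와서, 해당값과 비교에서 가장 작은 값을 없애면,
--             # 해당값이 최종적으로 남음
--             leftMinValIndex = i
--             answer += 1
--
--     # 가장 최소값을 기준으로 오른쪽만 보기 ( 왼쪽의 최소값과의 비교에서 전부 제거 가능 )
--     right = []
--     for i, data in enumerate( a[index+1:] ):
--         right.append( [data, index+i+1] )
--     right = sorted( right )
--
--     rightMinValIndex = index
--     for data, i in right:
--         if i > rightMinValIndex:
--             # 해당 값보다 작은 값이 오른쪽에 없다.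
--             # 여기까지 전체 a list에서 가장 작은 값을 가져와서, 해당값과 비교에서 가장 작은 값을 없애면,
--             # 해당값이 최종적으로 남음
--             rightMinValIndex = i
--             answer += 1
--
--     return answer
-- ===== SOURCE B (Python) =====
-- def solution(a):
--     # A balloon can survive iff it is strictly smaller than everything before it
--     # (strict prefix minimum) or no smaller balloon lies after it (non-strict
--     # suffix minimum); the two scans both count the first global minimum, hence -1.
--     prefix_count = 0
--     best = None
--     for x in a:
--         if best is None or x < best:
--             prefix_count += 1
--             best = x
--     suffix_count = 0
--     best = None
--     for x in reversed(a):
--         if best is None or x <= best: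
--             suffix_count += 1
--             best = x
--     return prefix_count + suffix_count - 1
-- ===== Notes on version B (the rewrite author's own statement) =====
-- stated objective: faster
-- what changed: Replaces min/index plus two sorted-by-value scans with two linear running-minimum passes (left-to-right strict prefix minima, right-to-left non-strict suffix minima), returning their sum minus the once-double-counted global minimum.
-- outside the precondition, e.g. on solution([]): A raises ValueError, B returns -1
import Mathlib
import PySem

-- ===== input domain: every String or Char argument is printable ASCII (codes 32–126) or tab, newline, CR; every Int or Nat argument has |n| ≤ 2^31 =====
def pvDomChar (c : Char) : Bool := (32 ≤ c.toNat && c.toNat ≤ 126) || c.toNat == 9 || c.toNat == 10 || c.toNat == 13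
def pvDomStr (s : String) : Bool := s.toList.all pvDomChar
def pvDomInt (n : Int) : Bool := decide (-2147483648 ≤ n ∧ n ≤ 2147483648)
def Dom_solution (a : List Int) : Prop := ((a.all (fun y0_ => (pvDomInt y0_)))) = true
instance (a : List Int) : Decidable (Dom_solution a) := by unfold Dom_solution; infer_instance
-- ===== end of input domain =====

-- B replaces A's min/index and two value-sorted index scans by two linear running-minimum
-- passes (count of strict prefix minima + count of non-strict suffix minima − 1);
-- proved equal on all nonempty lists (Python A raises ValueError on []).

-- ===== PORT A =====
def solution (a : List Int) : Int :=
  match PySem.List.min? a (fun x => x) with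
  | none => 0  -- dead code under Pre_solution: Python's min([]) raises ValueError
  | some minV =>
    match PySem.List.index? a minV with
    | none => 0  -- dead code: minV ∈ a
    | some index =>
      let answer : Int := 1
      let left : List (Int × Int) :=
        (PySem.List.enumerate (PySem.List.slice a none (some (index : Int))) 0).foldl
          (fun acc p => acc ++ [(p.2, p.1)]) []
      let left := PySem.List.sorted left (fun p => toLex p) false
      let stL : Int × Int :=
        left.foldl (fun st p => if p.2 < st.1 then (p.2, st.2 + 1) else st)
          ((index : Int), answer)
      let right : List (Int × Int) :=
        (PySem.List.enumerate (PySem.List.slice a (some ((index : Int) + 1)) none) 0).foldl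
          (fun acc p => acc ++ [(p.2, (index : Int) + p.1 + 1)]) []
      let right := PySem.List.sorted right (fun p => toLex p) false
      let stR : Int × Int :=
        right.foldl (fun st p => if p.2 > st.1 then (p.2, st.2 + 1) else st)
          ((index : Int), stL.2)
      stR.2

-- ===== PORT B =====
def solution_alt (a : List Int) : Int :=
  let stP := a.foldl
    (fun (st : Int × Option Int) x =>
      if (match st.2 with | none => true | some b => decide (x < b))
      then (st.1 + 1, some x) else st) (0, none)
  let stS := a.reverse.foldl
    (fun (st : Int × Option Int) x =>
      if (match st.2 with | none => true | some b => decide (x ≤ b))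
      then (st.1 + 1, some x) else st) (0, none)
  stP.1 + stS.1 - 1

-- ===== PRECONDITION & SPEC =====
-- Pre_ excludes only the empty list, on which Python's min(a) raises ValueError.
def Pre_solution (a : List Int) : Prop := a ≠ []
instance (a : List Int) : Decidable (Pre_solution a) := by unfold Pre_solution; infer_instance
def pvWitness_solution : List Int := ([5, 3, 4])
def Spec_solution (a : List Int) (out : Int) : Prop := out = solution_alt a
instance (a : List Int) (out : Int) : Decidable (Spec_solution a out) := by unfold Spec_solution; infer_instance

-- ===== CLAIM (what is proved, stated in full; the proofs are below) =====
def Claim_equal_solution : Prop := ∀ (a : List Int), Dom_solution a → Pre_solution a → Spec_solution a (solution a)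

-- ===== LEMMAS AND PROOFS =====

-- i is a strict prefix minimum of a
def pfxP (a : List Int) : Nat → Bool := fun i => decide (∀ j < i, a.getD i 0 < a.getD j 0)
-- i is a non-strict suffix minimum of a
def sfxP (a : List Int) : Nat → Bool := fun i =>
  decide (∀ j < a.length, i < j → a.getD i 0 ≤ a.getD j 0)
-- i (relative to position k+1) is a non-strict suffix minimum of a's tail after k
def rsfP (a : List Int) (k : Nat) : Nat → Bool := fun i =>
  decide (∀ j < a.length - k - 1, i < j → a.getD (k+1+i) 0 ≤ a.getD (k+1+j) 0)

-- A's left scan over a lex-strictly-sorted pair list counts the pairs whose index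
-- beats the minimum index among all lex-smaller pairs (and the initial bound m).
theorem scanL (ps : List (Int × Int))
    (hps : ps.Pairwise (fun p q => toLex p < toLex q)) :
    ∀ (m c : Int),
      (ps.foldl (fun st p => if p.2 < st.1 then (p.2, st.2 + 1) else st) (m, c)).2
        = c + ((ps.countP (fun p =>
            decide (p.2 < m ∧ ∀ q ∈ ps, toLex q < toLex p → p.2 < q.2))) : Int) := by
  induction ps with
  | nil => simp
  | cons p t ih =>
    intro m c
    have hpt : ∀ q ∈ t, toLex p < toLex q := (List.pairwise_cons.mp hps).1
    have ht := (List.pairwise_cons.mp hps).2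
    simp only [List.foldl_cons]
    by_cases hp : p.2 < m
    · rw [if_pos hp, ih ht p.2 (c+1), List.countP_cons]
      have hd : (decide (p.2 < m ∧ ∀ q ∈ p :: t, toLex q < toLex p → p.2 < q.2)) = true := by
        rw [decide_eq_true_iff]
        refine ⟨hp, fun r hr hlt => ?_⟩
        rcases List.mem_cons.mp hr with h | h
        · subst h; exact absurd hlt (lt_irrefl _)
        · exact absurd hlt (not_lt.mpr (le_of_lt (hpt r h)))
      have hcong : t.countP (fun q => decide (q.2 < m ∧ ∀ r ∈ p :: t, toLex r < toLex q → q.2 < r.2))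
          = t.countP (fun q => decide (q.2 < p.2 ∧ ∀ r ∈ t, toLex r < toLex q → q.2 < r.2)) := by
        apply List.countP_congr
        intro q hq
        simp only [decide_eq_true_iff]
        constructor
        · rintro ⟨h1, h2⟩
          exact ⟨h2 p List.mem_cons_self (hpt q hq), fun r hr hlt => h2 r (List.mem_cons_of_mem _ hr) hlt⟩
        · rintro ⟨h1, h2⟩
          refine ⟨h1.trans hp, fun r hr hlt => ?_⟩
          rcases List.mem_cons.mp hr with h | h
          · subst h; exact h1
          · exact h2 r h hlt
      rw [hcong, hd]; simp; omega
    · rw [if_neg hp, ih ht m c, List.countP_cons]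
      have hd : (decide (p.2 < m ∧ ∀ q ∈ p :: t, toLex q < toLex p → p.2 < q.2)) = false := by
        rw [decide_eq_false_iff_not]
        rintro ⟨h1, _⟩; exact hp h1
      have hcong : t.countP (fun q => decide (q.2 < m ∧ ∀ r ∈ p :: t, toLex r < toLex q → q.2 < r.2))
          = t.countP (fun q => decide (q.2 < m ∧ ∀ r ∈ t, toLex r < toLex q → q.2 < r.2)) := by
        apply List.countP_congr
        intro q hq
        simp only [decide_eq_true_iff]
        constructor
        · rintro ⟨h1, h2⟩
          exact ⟨h1, fun r hr hlt => h2 r (List.mem_cons_of_mem _ hr) hlt⟩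
        · rintro ⟨h1, h2⟩
          refine ⟨h1, fun r hr hlt => ?_⟩
          rcases List.mem_cons.mp hr with h | h
          · subst h; exact lt_of_lt_of_le h1 (not_lt.mp hp)
          · exact h2 r h hlt
      rw [hcong, hd]; simp

-- the mirror image for A's right scan (indices must exceed the running maximum)
theorem scanR (ps : List (Int × Int))
    (hps : ps.Pairwise (fun p q => toLex p < toLex q)) :
    ∀ (m c : Int),
      (ps.foldl (fun st p => if p.2 > st.1 then (p.2, st.2 + 1) else st) (m, c)).2
        = c + ((ps.countP (fun p =>
            decide (m < p.2 ∧ ∀ q ∈ ps, toLex q < toLex p → q.2 < p.2))) : Int) := by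
  induction ps with
  | nil => simp
  | cons p t ih =>
    intro m c
    have hpt : ∀ q ∈ t, toLex p < toLex q := (List.pairwise_cons.mp hps).1
    have ht := (List.pairwise_cons.mp hps).2
    simp only [List.foldl_cons]
    by_cases hp : p.2 > m
    · rw [if_pos hp, ih ht p.2 (c+1), List.countP_cons]
      have hd : (decide (m < p.2 ∧ ∀ q ∈ p :: t, toLex q < toLex p → q.2 < p.2)) = true := by
        rw [decide_eq_true_iff]
        refine ⟨hp, fun r hr hlt => ?_⟩
        rcases List.mem_cons.mp hr with h | h
        · subst h; exact absurd hlt (lt_irrefl _)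
        · exact absurd hlt (not_lt.mpr (le_of_lt (hpt r h)))
      have hcong : t.countP (fun q => decide (m < q.2 ∧ ∀ r ∈ p :: t, toLex r < toLex q → r.2 < q.2))
          = t.countP (fun q => decide (p.2 < q.2 ∧ ∀ r ∈ t, toLex r < toLex q → r.2 < q.2)) := by
        apply List.countP_congr
        intro q hq
        simp only [decide_eq_true_iff]
        constructor
        · rintro ⟨h1, h2⟩
          exact ⟨h2 p List.mem_cons_self (hpt q hq), fun r hr hlt => h2 r (List.mem_cons_of_mem _ hr) hlt⟩
        · rintro ⟨h1, h2⟩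
          refine ⟨hp.trans h1, fun r hr hlt => ?_⟩
          rcases List.mem_cons.mp hr with h | h
          · subst h; exact h1
          · exact h2 r h hlt
      rw [hcong, hd]; simp; omega
    · rw [if_neg hp, ih ht m c, List.countP_cons]
      have hd : (decide (m < p.2 ∧ ∀ q ∈ p :: t, toLex q < toLex p → q.2 < p.2)) = false := by
        rw [decide_eq_false_iff_not]
        rintro ⟨h1, _⟩; exact hp h1
      have hcong : t.countP (fun q => decide (m < q.2 ∧ ∀ r ∈ p :: t, toLex r < toLex q → r.2 < q.2))
          = t.countP (fun q => decide (m < q.2 ∧ ∀ r ∈ t, toLex r < toLex q → r.2 < q.2)) := by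
        apply List.countP_congr
        intro q hq
        simp only [decide_eq_true_iff]
        constructor
        · rintro ⟨h1, h2⟩
          exact ⟨h1, fun r hr hlt => h2 r (List.mem_cons_of_mem _ hr) hlt⟩
        · rintro ⟨h1, h2⟩
          refine ⟨h1, fun r hr hlt => ?_⟩
          rcases List.mem_cons.mp hr with h | h
          · subst h; exact lt_of_le_of_lt (not_lt.mp hp) h1
          · exact h2 r h hlt
      rw [hcong, hd]; simp

-- sorting a list of pairs with pairwise-distinct components is strictly lex-increasing
theorem pairStrict (E : List (Int × Int)) (hND : E.Nodup) :
    (PySem.List.sorted E (fun p : Int × Int => toLex p) false).Pairwise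
      (fun p q => toLex p < toLex q) := by
  have hperm := PySem.List.sorted_perm E (fun p : Int × Int => toLex p) false
  have hle := PySem.List.sorted_pairwise E (fun p : Int × Int => toLex p)
  have hnd : (PySem.List.sorted E (fun p : Int × Int => toLex p) false).Nodup :=
    hperm.nodup_iff.mpr hND
  exact (hle.and hnd).imp (fun {p q} h => lt_of_le_of_ne h.1 (fun he => h.2 (toLex.injective he)))

theorem sortScanL (E : List (Int × Int)) (hND : E.Nodup) (m c : Int) :
    ((PySem.List.sorted E (fun p : Int × Int => toLex p) false).foldl
      (fun st p => if p.2 < st.1 then (p.2, st.2 + 1) else st) (m, c)).2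
    = c + ((E.countP (fun p =>
        decide (p.2 < m ∧ ∀ q ∈ E, toLex q < toLex p → p.2 < q.2))) : Int) := by
  have hperm := PySem.List.sorted_perm E (fun p : Int × Int => toLex p) false
  rw [scanL _ (pairStrict E hND)]
  congr 1
  have hc1 : (PySem.List.sorted E (fun p : Int × Int => toLex p) false).countP
        (fun p => decide (p.2 < m ∧
          ∀ q ∈ PySem.List.sorted E (fun p : Int × Int => toLex p) false,
            toLex q < toLex p → p.2 < q.2))
      = (PySem.List.sorted E (fun p : Int × Int => toLex p) false).countP
        (fun p => decide (p.2 < m ∧ ∀ q ∈ E, toLex q < toLex p → p.2 < q.2)) := by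
    apply List.countP_congr
    intro p hp
    simp only [decide_eq_true_iff, PySem.List.mem_sorted]
  rw [hc1]
  exact congrArg _ (List.Perm.countP_eq _ hperm)

theorem sortScanR (E : List (Int × Int)) (hND : E.Nodup) (m c : Int) :
    ((PySem.List.sorted E (fun p : Int × Int => toLex p) false).foldl
      (fun st p => if p.2 > st.1 then (p.2, st.2 + 1) else st) (m, c)).2
    = c + ((E.countP (fun p =>
        decide (m < p.2 ∧ ∀ q ∈ E, toLex q < toLex p → q.2 < p.2))) : Int) := by
  have hperm := PySem.List.sorted_perm E (fun p : Int × Int => toLex p) false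
  rw [scanR _ (pairStrict E hND)]
  congr 1
  have hc1 : (PySem.List.sorted E (fun p : Int × Int => toLex p) false).countP
        (fun p => decide (m < p.2 ∧
          ∀ q ∈ PySem.List.sorted E (fun p : Int × Int => toLex p) false,
            toLex q < toLex p → q.2 < p.2))
      = (PySem.List.sorted E (fun p : Int × Int => toLex p) false).countP
        (fun p => decide (m < p.2 ∧ ∀ q ∈ E, toLex q < toLex p → q.2 < p.2)) := by
    apply List.countP_congr
    intro p hp
    simp only [decide_eq_true_iff, PySem.List.mem_sorted]
  rw [hc1]
  exact congrArg _ (List.Perm.countP_eq _ hperm)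

-- A's whole left half counts exactly the strict prefix minima below position k
theorem leftCount (a : List Int) (k : Nat) (hk : k ≤ a.length) (c : Int) :
    ((PySem.List.sorted
        ((PySem.List.enumerate (PySem.List.slice a none (some ((k : Nat) : Int))) 0).foldl
          (fun acc p => acc ++ [(p.2, p.1)]) []) (fun p => toLex p) false).foldl
      (fun st p => if p.2 < st.1 then (p.2, st.2 + 1) else st) (((k : Nat) : Int), c)).2
    = c + (((List.range k).countP (pfxP a)) : Int) := by
  rw [PySem.List.foldl_append_singleton_eq_map, List.nil_append,
      PySem.List.slice_to_natCast,
      PySem.List.enumerate_eq_map_pyRange (a.take k) 0]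
  have hlen : PySem.List.len (a.take k) = ((k : Nat) : Int) := by
    simp [PySem.List.len]; omega
  rw [hlen, PySem.List.pyRange_zero_nat, List.map_map, List.map_map]
  have hmapeq : (List.range k).map (((fun p : Int × Int => (p.2, p.1)) ∘
      (fun j : Int => (j, PySem.List.pyGetD (a.take k) j 0))) ∘ (fun i : Nat => (i : Int)))
      = (List.range k).map (fun i : Nat => (a.getD i 0, (i : Int))) := by
    apply List.map_congr_left
    intro i hi
    have hik : i < k := List.mem_range.mp hi
    simp only [Function.comp_apply, PySem.List.pyGetD_natCast]
    have : (a.take k).getD i 0 = a.getD i 0 := by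
      unfold List.getD; rw [List.getElem?_take]; simp [hik]
    rw [this]
  rw [hmapeq]
  have hNDE : ((List.range k).map (fun i : Nat => (a.getD i 0, (i : Int)))).Nodup := by
    apply List.Nodup.map _ List.nodup_range
    intro i j hij
    have : ((i : Nat) : Int) = (j : Nat) := congrArg Prod.snd hij
    exact_mod_cast this
  rw [sortScanL _ hNDE, List.countP_map]
  congr 1
  refine congrArg _ (List.countP_congr ?_)
  intro i hi
  have hik : i < k := List.mem_range.mp hi
  simp only [Function.comp_apply, decide_eq_true_iff, pfxP]
  constructor
  · rintro ⟨-, h2⟩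
    intro j hj
    by_contra hcon
    have hle : a.getD j 0 ≤ a.getD i 0 := not_lt.mp hcon
    have hlex : toLex ((fun i : Nat => (a.getD i 0, (i : Int))) j)
        < toLex ((fun i : Nat => (a.getD i 0, (i : Int))) i) := by
      apply Prod.Lex.lt_iff.mpr
      rcases lt_or_eq_of_le hle with h1 | h1
      · exact Or.inl h1
      · exact Or.inr ⟨h1, (by exact_mod_cast hj : ((j:Nat):Int) < ((i:Nat):Int))⟩
    have h3 := h2 ((fun i : Nat => (a.getD i 0, (i : Int))) j)
      (List.mem_map_of_mem (List.mem_range.mpr (hj.trans hik))) hlex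
    have h4 : (i : Int) < (j : Int) := h3
    omega
  · intro h
    refine ⟨by exact_mod_cast hik, ?_⟩
    rintro q hq hlt
    obtain ⟨j, hjr, rfl⟩ := List.mem_map.mp hq
    have hjk : j < k := List.mem_range.mp hjr
    show ((i : Nat) : Int) < ((j : Nat) : Int)
    rcases Prod.Lex.lt_iff.mp hlt with h1 | ⟨h1, h2⟩
    · have h1' : a.getD j 0 < a.getD i 0 := h1
      rcases lt_trichotomy j i with hj | hj | hj
      · exact absurd (h j hj) (by omega)
      · exact absurd h1' (by rw [hj]; exact lt_irrefl _)
      · exact_mod_cast hj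
    · have h1' : a.getD j 0 = a.getD i 0 := h1
      have h2' : ((j : Nat) : Int) < ((i : Nat) : Int) := h2
      have hj : j < i := by exact_mod_cast h2'
      exact absurd (h j hj) (by omega)

-- A's whole right half counts exactly the non-strict suffix minima above position k
theorem rightCount (a : List Int) (k : Nat) (_hk : k < a.length) (c : Int) :
    ((PySem.List.sorted
        ((PySem.List.enumerate (PySem.List.slice a (some (((k : Nat) : Int) + 1)) none) 0).foldl
          (fun acc p => acc ++ [(p.2, ((k : Nat) : Int) + p.1 + 1)]) []) (fun p => toLex p) false).foldl
      (fun st p => if p.2 > st.1 then (p.2, st.2 + 1) else st) (((k : Nat) : Int), c)).2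
    = c + (((List.range (a.length - k - 1)).countP (rsfP a k)) : Int) := by
  rw [PySem.List.foldl_append_singleton_eq_map, List.nil_append,
      PySem.List.slice_from a (show (0:Int) ≤ ((k : Nat) : Int) + 1 by positivity)]
  rw [show (((k : Nat) : Int) + 1).toNat = k + 1 by omega]
  rw [PySem.List.enumerate_eq_map_pyRange (a.drop (k+1)) 0]
  have hlen : PySem.List.len (a.drop (k+1)) = ((a.length - k - 1 : Nat) : Int) := by
    simp [PySem.List.len]; omega
  rw [hlen, PySem.List.pyRange_zero_nat, List.map_map, List.map_map]
  have hmapeq : (List.range (a.length - k - 1)).map (((fun p : Int × Int => (p.2, ((k : Nat) : Int) + p.1 + 1)) ∘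
      (fun j : Int => (j, PySem.List.pyGetD (a.drop (k+1)) j 0))) ∘ (fun i : Nat => (i : Int)))
      = (List.range (a.length - k - 1)).map
          (fun i : Nat => (a.getD (k+1+i) 0, ((k : Nat) : Int) + (i : Int) + 1)) := by
    apply List.map_congr_left
    intro i hi
    simp only [Function.comp_apply, PySem.List.pyGetD_natCast]
    have : (a.drop (k+1)).getD i 0 = a.getD (k+1+i) 0 := by
      unfold List.getD; rw [List.getElem?_drop]
    rw [this]
  rw [hmapeq]
  have hNDE : ((List.range (a.length - k - 1)).map
      (fun i : Nat => (a.getD (k+1+i) 0, ((k : Nat) : Int) + (i : Int) + 1))).Nodup := by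
    apply List.Nodup.map _ List.nodup_range
    intro i j hij
    have h2 : ((k : Nat) : Int) + (i : Int) + 1 = ((k : Nat) : Int) + (j : Int) + 1 :=
      congrArg Prod.snd hij
    omega
  rw [sortScanR _ hNDE, List.countP_map]
  congr 1
  refine congrArg _ (List.countP_congr ?_)
  intro i hi
  have him : i < a.length - k - 1 := List.mem_range.mp hi
  simp only [Function.comp_apply, decide_eq_true_iff, rsfP]
  constructor
  · rintro ⟨-, h2⟩
    intro j hjm hij
    by_contra hcon
    have hlt' : a.getD (k+1+j) 0 < a.getD (k+1+i) 0 := not_le.mp hcon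
    have hlex : toLex ((fun i : Nat => (a.getD (k+1+i) 0, ((k : Nat) : Int) + (i : Int) + 1)) j)
        < toLex ((fun i : Nat => (a.getD (k+1+i) 0, ((k : Nat) : Int) + (i : Int) + 1)) i) :=
      Prod.Lex.lt_iff.mpr (Or.inl hlt')
    have h3 := h2 _ (List.mem_map_of_mem (List.mem_range.mpr hjm)) hlex
    have h4 : ((k : Nat) : Int) + (j : Int) + 1 < ((k : Nat) : Int) + (i : Int) + 1 := h3
    omega
  · intro h
    refine ⟨by omega, ?_⟩
    rintro q hq hlt
    obtain ⟨j, hjr, rfl⟩ := List.mem_map.mp hq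
    have hjm : j < a.length - k - 1 := List.mem_range.mp hjr
    show ((k : Nat) : Int) + (j : Int) + 1 < ((k : Nat) : Int) + (i : Int) + 1
    rcases Prod.Lex.lt_iff.mp hlt with h1 | ⟨h1, h2⟩
    · have h1' : a.getD (k+1+j) 0 < a.getD (k+1+i) 0 := h1
      rcases lt_trichotomy j i with hj | hj | hj
      · omega
      · exact absurd h1' (by rw [hj]; exact lt_irrefl _)
      · exact absurd (h j hjm hj) (by omega)
    · have h2' : ((k : Nat) : Int) + (j : Int) + 1 < ((k : Nat) : Int) + (i : Int) + 1 := h2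
      omega

theorem countP_range_succ (n : Nat) (p : Nat → Bool) :
    (List.range (n+1)).countP p
      = (if p 0 then 1 else 0) + (List.range n).countP (fun i => p (i+1)) := by
  rw [List.range_succ_eq_map, List.countP_cons, List.countP_map]
  have : (p ∘ Nat.succ) = fun i => p (i+1) := rfl
  rw [this]; omega

theorem countP_range_rev (n : Nat) (p : Nat → Bool) :
    (List.range n).countP (fun i => p (n-1-i)) = (List.range n).countP p := by
  have h1 : (List.range n).countP (fun i => p (n-1-i))
      = ((List.range n).map (fun i => n-1-i)).countP p := by
    rw [List.countP_map]; rfl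
  rw [h1]
  apply List.Perm.countP_eq
  apply List.perm_of_nodup_nodup_toFinset_eq
  · apply List.Nodup.map_on _ List.nodup_range
    intro i hi j hj hij
    have hi' := List.mem_range.mp hi
    have hj' := List.mem_range.mp hj
    omega
  · exact List.nodup_range
  · ext x
    simp only [List.mem_toFinset, List.mem_map, List.mem_range]
    constructor
    · rintro ⟨j, hj, rfl⟩; omega
    · intro hx; exact ⟨n-1-x, by omega, by omega⟩

-- non-strict prefix minima of the reversed list = non-strict suffix minima of the list
theorem revCount (a : List Int) :
    (List.range a.reverse.length).countP
        (fun i => decide (∀ j < i, a.reverse.getD i 0 ≤ a.reverse.getD j 0))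
      = (List.range a.length).countP (sfxP a) := by
  rw [List.length_reverse]
  have h1 : (List.range a.length).countP
        (fun i => decide (∀ j < i, a.reverse.getD i 0 ≤ a.reverse.getD j 0))
      = (List.range a.length).countP (fun i => sfxP a (a.length - 1 - i)) := by
    apply List.countP_congr
    intro i hi
    have hin : i < a.length := List.mem_range.mp hi
    have hrev : ∀ m, m < a.length → a.reverse.getD m 0 = a.getD (a.length - 1 - m) 0 := by
      intro m hm
      unfold List.getD
      rw [List.getElem?_reverse hm]
    simp only [sfxP, decide_eq_true_iff]
    constructor
    · intro h j' hj' hlt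
      have := h (a.length - 1 - j') (by omega)
      rw [hrev _ hin, hrev _ (by omega : a.length - 1 - j' < a.length)] at this
      rw [show a.length - 1 - (a.length - 1 - j') = j' by omega] at this
      exact this
    · intro h j hj
      rw [hrev _ hin, hrev _ (by omega : j < a.length)]
      exact h (a.length - 1 - j) (by omega) (by omega)
  rw [h1, countP_range_rev]

-- B's first loop: the strict-prefix-minimum count, with best = min of the consumed prefix
theorem bscan1 (l : List Int) :
    ∀ (c : Int) (ob : Option Int),
      (l.foldl (fun (st : Int × Option Int) x =>
          if (match st.2 with | none => true | some b => decide (x < b))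
          then (st.1 + 1, some x) else st) (c, ob)).1
        = c + (((List.range l.length).countP (fun i =>
            decide ((∀ b ∈ ob, l.getD i 0 < b) ∧ ∀ j < i, l.getD i 0 < l.getD j 0))) : Int) := by
  induction l with
  | nil => simp
  | cons x t ih =>
    intro c ob
    simp only [List.foldl_cons, List.length_cons]
    rw [countP_range_succ]
    cases ob with
    | none =>
      rw [if_pos (show (match (none : Option Int) with | none => true | some b => decide (x < b)) = true from rfl)]
      rw [ih (c+1) (some x)]
      have hc : (List.range t.length).countP
            (fun i => decide ((∀ b ∈ some x, t.getD i 0 < b) ∧ ∀ j < i, t.getD i 0 < t.getD j 0))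
          = (List.range t.length).countP
            (fun i => decide ((∀ b ∈ (none : Option Int), (x::t).getD (i+1) 0 < b) ∧
              ∀ j < i+1, (x::t).getD (i+1) 0 < (x::t).getD j 0)) := by
        apply List.countP_congr
        intro i hi
        simp only [decide_eq_true_iff, Option.mem_def, Option.some.injEq, List.getD_cons_succ]
        constructor
        · rintro ⟨h1, h2⟩
          refine ⟨fun b hb => absurd hb (by simp), fun j hj => ?_⟩
          cases j with
          | zero => simpa using h1 x rfl
          | succ j' => simpa using h2 j' (by omega)
        · rintro ⟨-, h2⟩
          refine ⟨fun b hb => ?_, fun j hj => ?_⟩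
          · cases hb; simpa using h2 0 (by omega)
          · simpa using h2 (j+1) (by omega)
      rw [← hc]; simp; omega
    | some b =>
      by_cases hx : x < b
      · rw [if_pos (show (match (some b : Option Int) with | none => true | some b' => decide (x < b')) = true from decide_eq_true hx)]
        rw [ih (c+1) (some x)]
        have hc : (List.range t.length).countP
              (fun i => decide ((∀ b' ∈ some x, t.getD i 0 < b') ∧ ∀ j < i, t.getD i 0 < t.getD j 0))
            = (List.range t.length).countP
              (fun i => decide ((∀ b' ∈ some b, (x::t).getD (i+1) 0 < b') ∧
                ∀ j < i+1, (x::t).getD (i+1) 0 < (x::t).getD j 0)) := by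
          apply List.countP_congr
          intro i hi
          simp only [decide_eq_true_iff, Option.mem_def, Option.some.injEq, List.getD_cons_succ]
          constructor
          · rintro ⟨h1, h2⟩
            have hx' : t.getD i 0 < x := by simpa using h1 x rfl
            refine ⟨fun b' hb' => ?_, fun j hj => ?_⟩
            · cases hb'; exact hx'.trans hx
            · cases j with
              | zero => simpa using hx'
              | succ j' => simpa using h2 j' (by omega)
          · rintro ⟨h1, h2⟩
            refine ⟨fun b' hb' => ?_, fun j hj => ?_⟩
            · cases hb'; simpa using h2 0 (by omega)
            · simpa using h2 (j+1) (by omega)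
        rw [← hc]; simp [hx]; omega
      · rw [if_neg (show ¬ ((match (some b : Option Int) with | none => true | some b' => decide (x < b')) = true) by simpa using hx)]
        rw [ih c (some b)]
        have hc : (List.range t.length).countP
              (fun i => decide ((∀ b' ∈ some b, t.getD i 0 < b') ∧ ∀ j < i, t.getD i 0 < t.getD j 0))
            = (List.range t.length).countP
              (fun i => decide ((∀ b' ∈ some b, (x::t).getD (i+1) 0 < b') ∧
                ∀ j < i+1, (x::t).getD (i+1) 0 < (x::t).getD j 0)) := by
          apply List.countP_congr
          intro i hi
          simp only [decide_eq_true_iff, Option.mem_def, Option.some.injEq, List.getD_cons_succ]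
          constructor
          · rintro ⟨h1, h2⟩
            have hb' : t.getD i 0 < b := by simpa using h1 b rfl
            refine ⟨fun b' hb2 => ?_, fun j hj => ?_⟩
            · cases hb2; exact hb'
            · cases j with
              | zero => simp only [List.getD_cons_zero]; exact hb'.trans_le (not_lt.mp hx)
              | succ j' => simpa using h2 j' (by omega)
          · rintro ⟨h1, h2⟩
            refine ⟨fun b' hb2 => ?_, fun j hj => ?_⟩
            · cases hb2; simpa using h1 b rfl
            · simpa using h2 (j+1) (by omega)
        rw [← hc]; simp [hx]

-- B's second loop: the same with ≤, giving non-strict prefix minima of the traversed list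
theorem bscan2 (l : List Int) :
    ∀ (c : Int) (ob : Option Int),
      (l.foldl (fun (st : Int × Option Int) x =>
          if (match st.2 with | none => true | some b => decide (x ≤ b))
          then (st.1 + 1, some x) else st) (c, ob)).1
        = c + (((List.range l.length).countP (fun i =>
            decide ((∀ b ∈ ob, l.getD i 0 ≤ b) ∧ ∀ j < i, l.getD i 0 ≤ l.getD j 0))) : Int) := by
  induction l with
  | nil => simp
  | cons x t ih =>
    intro c ob
    simp only [List.foldl_cons, List.length_cons]
    rw [countP_range_succ]
    cases ob with
    | none =>
      rw [if_pos (show (match (none : Option Int) with | none => true | some b => decide (x ≤ b)) = true from rfl)]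
      rw [ih (c+1) (some x)]
      have hc : (List.range t.length).countP
            (fun i => decide ((∀ b ∈ some x, t.getD i 0 ≤ b) ∧ ∀ j < i, t.getD i 0 ≤ t.getD j 0))
          = (List.range t.length).countP
            (fun i => decide ((∀ b ∈ (none : Option Int), (x::t).getD (i+1) 0 ≤ b) ∧
              ∀ j < i+1, (x::t).getD (i+1) 0 ≤ (x::t).getD j 0)) := by
        apply List.countP_congr
        intro i hi
        simp only [decide_eq_true_iff, Option.mem_def, Option.some.injEq, List.getD_cons_succ]
        constructor
        · rintro ⟨h1, h2⟩
          refine ⟨fun b hb => absurd hb (by simp), fun j hj => ?_⟩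
          cases j with
          | zero => simpa using h1 x rfl
          | succ j' => simpa using h2 j' (by omega)
        · rintro ⟨-, h2⟩
          refine ⟨fun b hb => ?_, fun j hj => ?_⟩
          · cases hb; simpa using h2 0 (by omega)
          · simpa using h2 (j+1) (by omega)
      rw [← hc]; simp; omega
    | some b =>
      by_cases hx : x ≤ b
      · rw [if_pos (show (match (some b : Option Int) with | none => true | some b' => decide (x ≤ b')) = true from decide_eq_true hx)]
        rw [ih (c+1) (some x)]
        have hc : (List.range t.length).countP
              (fun i => decide ((∀ b' ∈ some x, t.getD i 0 ≤ b') ∧ ∀ j < i, t.getD i 0 ≤ t.getD j 0))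
            = (List.range t.length).countP
              (fun i => decide ((∀ b' ∈ some b, (x::t).getD (i+1) 0 ≤ b') ∧
                ∀ j < i+1, (x::t).getD (i+1) 0 ≤ (x::t).getD j 0)) := by
          apply List.countP_congr
          intro i hi
          simp only [decide_eq_true_iff, Option.mem_def, Option.some.injEq, List.getD_cons_succ]
          constructor
          · rintro ⟨h1, h2⟩
            have hx' : t.getD i 0 ≤ x := by simpa using h1 x rfl
            refine ⟨fun b' hb' => ?_, fun j hj => ?_⟩
            · cases hb'; exact hx'.trans hx
            · cases j with
              | zero => simpa using hx'
              | succ j' => simpa using h2 j' (by omega)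
          · rintro ⟨h1, h2⟩
            refine ⟨fun b' hb' => ?_, fun j hj => ?_⟩
            · cases hb'; simpa using h2 0 (by omega)
            · simpa using h2 (j+1) (by omega)
        rw [← hc]; simp [hx]; omega
      · rw [if_neg (show ¬ ((match (some b : Option Int) with | none => true | some b' => decide (x ≤ b')) = true) by simpa using hx)]
        rw [ih c (some b)]
        have hc : (List.range t.length).countP
              (fun i => decide ((∀ b' ∈ some b, t.getD i 0 ≤ b') ∧ ∀ j < i, t.getD i 0 ≤ t.getD j 0))
            = (List.range t.length).countP
              (fun i => decide ((∀ b' ∈ some b, (x::t).getD (i+1) 0 ≤ b') ∧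
                ∀ j < i+1, (x::t).getD (i+1) 0 ≤ (x::t).getD j 0)) := by
          apply List.countP_congr
          intro i hi
          simp only [decide_eq_true_iff, Option.mem_def, Option.some.injEq, List.getD_cons_succ]
          constructor
          · rintro ⟨h1, h2⟩
            have hb' : t.getD i 0 ≤ b := by simpa using h1 b rfl
            refine ⟨fun b' hb2 => ?_, fun j hj => ?_⟩
            · cases hb2; exact hb'
            · cases j with
              | zero => simp only [List.getD_cons_zero]; exact hb'.trans (not_le.mp hx).le
              | succ j' => simpa using h2 j' (by omega)
          · rintro ⟨h1, h2⟩
            refine ⟨fun b' hb2 => ?_, fun j hj => ?_⟩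
            · cases hb2; simpa using h1 b rfl
            · simpa using h2 (j+1) (by omega)
        rw [← hc]; simp [hx]

-- B = (# strict prefix minima) + (# non-strict suffix minima) − 1
theorem altEval (a : List Int) :
    solution_alt a = ((List.range a.length).countP (pfxP a) : Int)
      + ((List.range a.length).countP (sfxP a) : Int) - 1 := by
  simp only [solution_alt]
  rw [bscan1 a 0 none, bscan2 a.reverse 0 none]
  have h1 : (List.range a.length).countP (fun i =>
        decide ((∀ b ∈ (none : Option Int), a.getD i 0 < b) ∧ ∀ j < i, a.getD i 0 < a.getD j 0))
      = (List.range a.length).countP (pfxP a) := by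
    apply List.countP_congr
    intro i hi
    simp only [decide_eq_true_iff, pfxP]
    constructor
    · rintro ⟨-, h⟩; exact h
    · intro h; exact ⟨fun b hb => absurd hb (by simp), h⟩
  have h2 : (List.range a.reverse.length).countP (fun i =>
        decide ((∀ b ∈ (none : Option Int), a.reverse.getD i 0 ≤ b) ∧
          ∀ j < i, a.reverse.getD i 0 ≤ a.reverse.getD j 0))
      = (List.range a.length).countP (sfxP a) := by
    rw [← revCount a]
    apply List.countP_congr
    intro i hi
    simp only [decide_eq_true_iff]
    constructor
    · rintro ⟨-, h⟩; exact h
    · intro h; exact ⟨fun b hb => absurd hb (by simp), h⟩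
  rw [h1, h2]
  omega

theorem splitE1 (a : List Int) (k : Nat) (hk : k < a.length)
    (hmin : ∀ j < a.length, a.getD k 0 ≤ a.getD j 0)
    (hfst : ∀ j < k, a.getD j 0 ≠ a.getD k 0) :
    (List.range a.length).countP (pfxP a) = (List.range k).countP (pfxP a) + 1 := by
  rw [show a.length = k + (a.length - k) by omega, List.range_add, List.countP_append,
      List.countP_map]
  have h2 : (List.range (a.length - k)).countP ((pfxP a) ∘ (fun x => k + x)) = 1 := by
    rw [show a.length - k = (a.length - k - 1) + 1 by omega, countP_range_succ]
    have hh : ((pfxP a) ∘ (fun x => k + x)) 0 = true := by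
      simp only [Function.comp_apply, pfxP, decide_eq_true_iff]
      intro j hj
      exact lt_of_le_of_ne (hmin j (by omega)) (fun he => hfst j hj he.symm)
    rw [hh]
    have hz : (List.range (a.length - k - 1)).countP
        (fun i => ((pfxP a) ∘ (fun x => k + x)) (i+1)) = 0 := by
      rw [List.countP_eq_zero]
      intro i hi
      have him := List.mem_range.mp hi
      simp only [Function.comp_apply, pfxP, decide_eq_true_iff]
      intro hcon
      have := hcon k (by omega)
      have h2 := hmin (k + (i+1)) (by omega)
      omega
    rw [hz]; simp
  omega

theorem splitE2 (a : List Int) (k : Nat) (hk : k < a.length)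
    (hmin : ∀ j < a.length, a.getD k 0 ≤ a.getD j 0)
    (hfst : ∀ j < k, a.getD j 0 ≠ a.getD k 0) :
    (List.range a.length).countP (sfxP a)
      = 1 + (List.range (a.length - k - 1)).countP (rsfP a k) := by
  conv_lhs => rw [show a.length = k + (a.length - k) by omega, List.range_add]
  rw [List.countP_append, List.countP_map]
  have h0 : (List.range k).countP (sfxP a) = 0 := by
    rw [List.countP_eq_zero]
    intro i hi
    have him := List.mem_range.mp hi
    simp only [sfxP, decide_eq_true_iff]
    intro hcon
    have h1 := hcon k (by omega) (by omega)
    have h2 := hmin i (by omega)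
    exact hfst i him (by omega)
  rw [h0]
  have h2 : (List.range (a.length - k)).countP ((sfxP a) ∘ (fun x => k + x))
      = 1 + (List.range (a.length - k - 1)).countP (rsfP a k) := by
    rw [show a.length - k = (a.length - k - 1) + 1 by omega, countP_range_succ]
    have hh : ((sfxP a) ∘ (fun x => k + x)) 0 = true := by
      simp only [Function.comp_apply, sfxP, decide_eq_true_iff]
      intro j hj hlt
      exact hmin j hj
    rw [hh]
    have hc : (List.range (a.length - k - 1)).countP
          (fun i => ((sfxP a) ∘ (fun x => k + x)) (i+1))
        = (List.range (a.length - k - 1)).countP (rsfP a k) := by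
      apply List.countP_congr
      intro i hi
      have him := List.mem_range.mp hi
      simp only [Function.comp_apply, sfxP, rsfP, decide_eq_true_iff]
      constructor
      · intro h j hjm hij
        have := h (k+1+j) (by omega) (by omega)
        rw [show k + (i+1) = k+1+i by omega] at this
        exact this
      · intro h j hjn hlt
        have := h (j - k - 1) (by omega) (by omega)
        rw [show k+1+(j-k-1) = j by omega, show k+1+i = k + (i+1) by omega] at this
        exact this
    rw [hc]; simp
  omega

-- ===== VERDICT (by name: the statement is the Claim_ definition above) =====
theorem solution_spec : Claim_equal_solution := by
  intro a _hdom hpre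
  unfold Spec_solution
  cases hm : PySem.List.min? a (fun x => x) with
  | none => exact absurd ((PySem.List.min?_eq_none_iff a (fun x => x)).mp hm) hpre
  | some minV =>
    cases hidx : PySem.List.index? a minV with
    | none =>
      exact absurd (PySem.List.min?_mem hm) ((PySem.List.index?_eq_none_iff a minV).mp hidx)
    | some k =>
      obtain ⟨hk, hak, hfst⟩ := PySem.List.getElem_of_index?_eq_some hidx
      have hminmem := PySem.List.min?_isMin hm
      have hgetk : a.getD k 0 = minV := by
        rw [List.getD_eq_getElem a 0 hk, hak]
      have hminD : ∀ j < a.length, a.getD k 0 ≤ a.getD j 0 := by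
        intro j hj
        rw [hgetk, List.getD_eq_getElem a 0 hj]
        exact hminmem _ (List.getElem_mem hj)
      have hfstD : ∀ j < k, a.getD j 0 ≠ a.getD k 0 := by
        intro j hj
        rw [hgetk, List.getD_eq_getElem a 0 (hj.trans hk)]
        exact fun he => hfst j hj he
      show solution a = solution_alt a
      simp only [solution, hm, hidx]
      rw [leftCount a k hk.le 1, rightCount a k hk _]
      rw [altEval a, splitE1 a k hk hminD hfstD, splitE2 a k hk hminD hfstD]
      push_cast
      ring
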